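-- pv_equiv track=rewrite | github.com/iMshivam25/Leetcode | 2155-find-missing-observations/find-missing-observations.py | missingRolls
-- ===== SOURCE A (Python) =====
-- from typing import List
--
-- def missingRolls(rolls: List[int], mean: int, n: int) -> List[int]:
--     sum_m = sum(rolls)
--     sum_n = mean * (n + len(rolls)) - sum_m
--     limit = 6*n
--     if isinstance(sum_n, float) or sum_n > limit or sum_n < n:
--         ans = []
--         return ans
--     else:
--         ans = [1]*n
--         sum_n -= n
--         idx = 0
--         while(sum_n != 0):
--             ans[idx]+=1
--             if ans[idx]==6:
--                 idx+=1
--             sum_n-=1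
--         return ans
-- ===== SOURCE B (Python) =====
-- from typing import List
--
-- def missingRolls(rolls: List[int], mean: int, n: int) -> List[int]:
--     sum_n = mean * (n + len(rolls)) - sum(rolls)
--     if sum_n > 6 * n or sum_n < n:
--         return []
--     q, r = divmod(sum_n - n, 5)
--     return [6] * q + ([1 + r] if r else []) + [1] * (n - q - (1 if r else 0))
-- ===== Notes on version B (the rewrite author's own statement) =====
-- stated objective: simpler
-- what changed: Replaced the O(sum) incrementing while loop with a closed-form divmod: q dice of 6, one die of 1+r if r>0, and 1s for the rest.
import Mathlib
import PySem

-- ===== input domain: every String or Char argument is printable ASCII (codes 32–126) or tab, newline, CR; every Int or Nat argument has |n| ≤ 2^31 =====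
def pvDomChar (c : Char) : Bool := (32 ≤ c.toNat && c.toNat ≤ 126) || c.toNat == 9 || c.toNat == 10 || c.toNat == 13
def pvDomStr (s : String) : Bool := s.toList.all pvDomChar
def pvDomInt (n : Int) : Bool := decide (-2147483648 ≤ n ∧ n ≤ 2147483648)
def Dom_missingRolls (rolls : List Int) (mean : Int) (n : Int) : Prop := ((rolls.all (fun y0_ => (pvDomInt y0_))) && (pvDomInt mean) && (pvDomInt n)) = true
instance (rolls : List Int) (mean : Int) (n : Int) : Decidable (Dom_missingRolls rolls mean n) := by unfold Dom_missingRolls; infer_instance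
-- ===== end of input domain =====

-- B replaces A's O(sum) one-increment-at-a-time while loop by a closed-form divmod construction (objective: simpler).

-- ===== PORT A =====
-- A's while loop: state (ans, idx, sum_n); the 'sumn < 0' branch is only a totality
-- guard — A's guard ensures sumn starts ≥ 0, so it is never taken on reachable states.
def missingRollsLoop (ans : List Int) (idx : Nat) (sumn : Int) : List Int :=
  if sumn = 0 then ans
  else if sumn < 0 then ans
  else
    let ans' := ans.set idx (ans.getD idx 0 + 1)
    let idx' := if ans'.getD idx 0 = 6 then idx + 1 else idx
    missingRollsLoop ans' idx' (sumn - 1)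
termination_by sumn.toNat
decreasing_by omega

def missingRolls (rolls : List Int) (mean : Int) (n : Int) : List Int :=
  let sum_m := rolls.sum
  let sum_n := mean * (n + rolls.length) - sum_m
  let limit := 6 * n
  if sum_n > limit ∨ sum_n < n then []
  else missingRollsLoop (List.replicate n.toNat 1) 0 (sum_n - n)

-- ===== PORT B =====
def missingRolls_alt (rolls : List Int) (mean : Int) (n : Int) : List Int :=
  let sum_n := mean * (n + rolls.length) - rolls.sum
  if sum_n > 6 * n ∨ sum_n < n then []
  else
    let q := PySem.Int.floordiv (sum_n - n) 5
    let r := PySem.Int.mod (sum_n - n) 5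
    List.replicate q.toNat 6 ++ (if r ≠ 0 then [1 + r] else [])
      ++ List.replicate (n - q - (if r ≠ 0 then 1 else 0)).toNat 1

-- ===== PRECONDITION & SPEC =====
def Spec_missingRolls (rolls : List Int) (mean : Int) (n : Int) (out : List Int) : Prop := out = missingRolls_alt rolls mean n
instance (rolls : List Int) (mean : Int) (n : Int) (out : List Int) : Decidable (Spec_missingRolls rolls mean n out) := by unfold Spec_missingRolls; infer_instance

-- ===== CLAIM (what is proved, stated in full; the proofs are below) =====
def Claim_equal_missingRolls : Prop := ∀ (rolls : List Int) (mean : Int) (n : Int), Dom_missingRolls rolls mean n → Spec_missingRolls rolls mean n (missingRolls rolls mean n)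

-- ===== LEMMAS AND PROOFS =====

theorem pv_getD_mid (i : Nat) (c : Int) (l : List Int) :
    (List.replicate i (6:Int) ++ c :: l).getD i 0 = c := by
  induction i with
  | zero => simp
  | succ k ih => simpa [List.replicate_succ] using ih

theorem pv_set_mid (i : Nat) (c z : Int) (l : List Int) :
    (List.replicate i (6:Int) ++ c :: l).set i z = List.replicate i 6 ++ z :: l := by
  induction i with
  | zero => simp
  | succ k ih => simpa [List.replicate_succ] using ih

-- absorbing increments within one cell of current value c (1 ≤ c ≤ 5)
theorem pv_loop_cell (e : Nat) : ∀ (i m : Nat) (c : Int), 1 ≤ c → c ≤ 5 →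
    missingRollsLoop (List.replicate i 6 ++ c :: List.replicate m 1) i e =
      if (e : Int) ≤ 5 - c then
        List.replicate i 6 ++ (c + e) :: List.replicate m 1
      else
        missingRollsLoop (List.replicate (i+1) 6 ++ List.replicate m 1) (i+1)
          ((e : Int) - (6 - c)) := by
  induction e with
  | zero =>
    intro i m c h1 h5
    rw [missingRollsLoop]
    rw [if_pos (by norm_num : ((0:Nat):Int) = 0), if_pos (by push_cast; omega : ((0:Nat):Int) ≤ 5 - c)]
    norm_num
  | succ k ih =>
    intro i m c h1 h5
    rw [missingRollsLoop]
    have hne : ((k+1 : Nat) : Int) ≠ 0 := by push_cast; omega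
    have hnlt : ¬ ((k+1 : Nat) : Int) < 0 := by push_cast; omega
    rw [if_neg hne, if_neg hnlt]
    simp only [pv_getD_mid, pv_set_mid]
    have hstep : ((k+1 : Nat) : Int) - 1 = ((k:Nat) : Int) := by push_cast; ring
    by_cases h6 : c + 1 = 6
    · rw [if_pos h6, hstep]
      have hc : c = 5 := by omega
      subst hc
      have hlist : List.replicate i (6:Int) ++ (5+1) :: List.replicate m 1
          = List.replicate (i+1) 6 ++ List.replicate m 1 := by
        rw [List.replicate_succ' (n := i)]
        simp
      have hno : ¬ ((k+1:Nat):Int) ≤ 5 - 5 := by push_cast; omega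
      have harg : ((k+1:Nat):Int) - (6 - 5) = ((k:Nat):Int) := by push_cast; ring
      rw [hlist, if_neg hno, harg]
    · rw [if_neg h6, hstep, ih i m (c+1) (by omega) (by omega)]
      by_cases hle : ((k+1 : Nat) : Int) ≤ 5 - c
      · rw [if_pos hle, if_pos (show ((k:Nat):Int) ≤ 5 - (c+1) by push_cast at *; omega)]
        have hv : c + 1 + ((k:Nat):Int) = c + ((k+1:Nat):Int) := by push_cast; ring
        rw [hv]
      · rw [if_neg hle, if_neg (show ¬ ((k:Nat):Int) ≤ 5 - (c+1) by push_cast at *; omega)]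
        have hv : ((k:Nat):Int) - (6 - (c+1)) = ((k+1:Nat):Int) - (6 - c) := by push_cast; ring
        rw [hv]

-- main invariant: distributing e extras over i full dice and m fresh 1-dice
theorem pv_loop_main (e : Nat) : ∀ (i m : Nat), e ≤ 5 * m →
    missingRollsLoop (List.replicate i 6 ++ List.replicate m 1) i e =
      List.replicate (i + e / 5) 6
        ++ (if e % 5 ≠ 0 then [(1 : Int) + (e % 5 : Nat)] else [])
        ++ List.replicate (m - e / 5 - (if e % 5 ≠ 0 then 1 else 0)) 1 := by
  induction e using Nat.strong_induction_on with
  | _ e ih =>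
    intro i m hm
    match e, m with
    | 0, m =>
      rw [missingRollsLoop]
      simp
    | (k+1), 0 => omega
    | (k+1), (m'+1) =>
      have hrw : List.replicate (m'+1) (1:Int) = (1:Int) :: List.replicate m' 1 := by
        simp [List.replicate_succ]
      rw [hrw, pv_loop_cell (k+1) i m' 1 (by norm_num) (by norm_num)]
      by_cases hle : ((k+1 : Nat) : Int) ≤ 5 - 1
      · -- k+1 ≤ 4 : everything fits in the first cell
        have hk : k + 1 ≤ 4 := by exact_mod_cast (by omega : ((k+1:Nat):Int) ≤ 4)
        rw [if_pos hle]
        have hd : (k+1) / 5 = 0 := by omega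
        have hmod : (k+1) % 5 = k+1 := by omega
        have hne : (k+1) % 5 ≠ 0 := by omega
        simp [hd, hmod]
      · -- k+1 ≥ 5 : first cell filled to 6, recurse
        rw [if_neg hle]
        have hk5 : 5 ≤ k + 1 := by
          by_contra h
          push_neg at h
          apply hle
          push_cast
          omega
        have harg : ((k+1 : Nat) : Int) - (6 - 1) = ((k + 1 - 5 : Nat) : Int) := by
          omega
        rw [harg, ih (k+1-5) (by omega) (i+1) m' (by omega)]
        have hd1 : 1 ≤ (k+1)/5 := by omega
        have hd : (k+1-5)/5 = (k+1)/5 - 1 := by omega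
        have hmod : (k+1-5) % 5 = (k+1) % 5 := by omega
        rw [hd, hmod]
        have hi : i + 1 + ((k+1)/5 - 1) = i + (k+1)/5 := by omega
        rw [hi]
        congr 2
        by_cases hz : (k+1) % 5 ≠ 0 <;> simp [hz] <;> omega

-- ===== VERDICT (by name: the statement is the Claim_ definition above) =====
theorem missingRolls_spec : Claim_equal_missingRolls := by
  unfold Claim_equal_missingRolls
  intro rolls mean n _
  unfold Spec_missingRolls
  simp only [missingRolls, missingRolls_alt]
  by_cases hg : mean * (n + (rolls.length:Int)) - rolls.sum > 6 * n ∨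
      mean * (n + (rolls.length:Int)) - rolls.sum < n
  · rw [if_pos hg, if_pos hg]
  · rw [if_neg hg, if_neg hg]
    push_neg at hg
    obtain ⟨h1, h2⟩ := hg
    set s := mean * (n + (rolls.length:Int)) - rolls.sum with hs
    have hn0 : 0 ≤ n := by omega
    have hle : (s - n).toNat ≤ 5 * n.toNat := by omega
    have hcast : s - n = (((s - n).toNat : Nat) : Int) := by omega
    have hrep : List.replicate n.toNat (1:Int) = List.replicate 0 (6:Int) ++ List.replicate n.toNat 1 := by
      simp
    rw [hcast, hrep, pv_loop_main (s-n).toNat 0 n.toNat hle]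
    set e := (s - n).toNat with he
    have hq : PySem.Int.floordiv (e:Int) 5 = ((e/5 : Nat) : Int) := by
      exact_mod_cast PySem.Int.floordiv_natCast e 5
    have hr : PySem.Int.mod (e:Int) 5 = ((e%5 : Nat) : Int) := by
      exact_mod_cast PySem.Int.mod_natCast e 5
    rw [hq, hr]
    have hq1 : (((e/5 : Nat) : Int)).toNat = e/5 := by omega
    rw [hq1, Nat.zero_add]
    by_cases hz : e % 5 = 0
    · have hz' : ((e % 5 : Nat) : Int) = 0 := by omega
      simp only [hz, Nat.cast_zero, ne_eq, not_true_eq_false, if_false, List.append_nil]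
      congr 1
      congr 1
      omega
    · have hz' : ((e % 5 : Nat) : Int) ≠ 0 := by omega
      simp only [hz, hz', ne_eq, not_false_eq_true, if_true]
      congr 1
      congr 1
      omega
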